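-- pv_equiv track=rewrite | github.com/odai01/Introduction-To-ML | HW2/assignment2.py | Intersection_Intervals_length
-- ===== SOURCE A (Python) =====
-- def Intersection_Intervals_length(intervals1,intervals2):
--     intersections_length=0
--     for i in intervals1:
--         for j in intervals2:
--             intersection_start=max(i[0],j[0])
--             intersection_end=min(i[1],j[1])
--             if(intersection_start<intersection_end):
--                 intersections_length+=(intersection_end-intersection_start)
--     return intersections_length
-- ===== SOURCE B (Python) =====
-- def Intersection_Intervals_length(intervals1, intervals2):
--     # Coordinate sweep: sorted distinct endpoints cut the line into elementary
--     # segments; each segment contributes its length times (coverage count in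
--     # intervals1) * (coverage count in intervals2).
--     pts = sorted({p for iv in intervals1 + intervals2 for p in (iv[0], iv[1])})
--     total = 0
--     for x, y in zip(pts, pts[1:]):
--         c1 = sum(1 for iv in intervals1 if iv[0] <= x and y <= iv[1])
--         c2 = sum(1 for iv in intervals2 if iv[0] <= x and y <= iv[1])
--         total += (y - x) * c1 * c2
--     return total
-- ===== Notes on version B (the rewrite author's own statement) =====
-- stated objective: alternative
-- what changed: Replaces the O(n*m) pairwise intersection loop by a coordinate sweep: the sorted distinct endpoints cut the line into elementary segments and each segment contributes length * (coverage count in intervals1) * (coverage count in intervals2).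
-- outside the precondition, e.g. on Intersection_Intervals_length([], [[8], [], [-2], [1]]): A returns 0, B raises IndexError
import Mathlib
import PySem

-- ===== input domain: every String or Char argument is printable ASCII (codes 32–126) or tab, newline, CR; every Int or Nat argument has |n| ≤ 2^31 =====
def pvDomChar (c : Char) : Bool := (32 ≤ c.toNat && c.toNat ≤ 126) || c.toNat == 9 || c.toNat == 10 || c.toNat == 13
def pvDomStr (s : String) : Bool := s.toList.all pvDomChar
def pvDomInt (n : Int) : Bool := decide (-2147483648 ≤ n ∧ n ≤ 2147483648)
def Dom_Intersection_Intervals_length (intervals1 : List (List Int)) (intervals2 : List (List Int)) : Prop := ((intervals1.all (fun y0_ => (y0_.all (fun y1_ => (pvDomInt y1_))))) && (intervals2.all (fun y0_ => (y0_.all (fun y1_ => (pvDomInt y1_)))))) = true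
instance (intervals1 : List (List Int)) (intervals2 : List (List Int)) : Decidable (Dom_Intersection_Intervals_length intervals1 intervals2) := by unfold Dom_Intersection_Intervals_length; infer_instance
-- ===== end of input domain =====

-- B replaces A's pairwise intersection loop by a coordinate sweep over the sorted
-- distinct endpoints (alternative algorithm, similar cost); proved equal on all
-- inputs where every interval list has at least two entries (otherwise Python raises).


-- iv[0] and iv[1]; total with default 0, Pre_ guarantees the index is in range
def pvLo (iv : List Int) : Int := PySem.List.pyGetD iv 0 0
def pvHi (iv : List Int) : Int := PySem.List.pyGetD iv 1 0

-- ===== PORT A =====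
def Intersection_Intervals_length (intervals1 : List (List Int)) (intervals2 : List (List Int)) : Int :=
  intervals1.foldl (fun acc i =>
    intervals2.foldl (fun acc2 j =>
      let intersection_start := max (pvLo i) (pvLo j)
      let intersection_end := min (pvHi i) (pvHi j)
      if intersection_start < intersection_end then acc2 + (intersection_end - intersection_start)
      else acc2) acc) 0

-- ===== PORT B =====
-- {p for iv in intervals1 + intervals2 for p in (iv[0], iv[1])}
def pvEnds (ivs : List (List Int)) : List Int :=
  ivs.foldr (fun iv acc => pvLo iv :: pvHi iv :: acc) []

-- sum(1 for iv in ivs if iv[0] <= x and y <= iv[1])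
def pvCount (ivs : List (List Int)) (x y : Int) : Int :=
  ivs.foldl (fun c iv => if pvLo iv ≤ x ∧ y ≤ pvHi iv then c + 1 else c) 0

-- the 'for x, y in zip(pts, pts[1:])' accumulation loop
def pvSweep (intervals1 intervals2 : List (List Int)) : List Int → Int
  | x :: y :: rest =>
      (y - x) * pvCount intervals1 x y * pvCount intervals2 x y
        + pvSweep intervals1 intervals2 (y :: rest)
  | _ => 0

def Intersection_Intervals_length_alt (intervals1 : List (List Int)) (intervals2 : List (List Int)) : Int :=
  pvSweep intervals1 intervals2
    (PySem.List.sorted (PySem.Set.ofList (pvEnds (intervals1 ++ intervals2))) (fun x => x) false)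

-- ===== PRECONDITION & SPEC =====
-- Pre_ excludes inputs containing an interval with fewer than two entries: on those
-- both Pythons raise IndexError at iv[0]/iv[1], except that A happens to return 0
-- without indexing anything when one of the two lists is empty, where B still
-- naturally reads every endpoint and raises.
def Pre_Intersection_Intervals_length (intervals1 : List (List Int)) (intervals2 : List (List Int)) : Prop :=
  (∀ iv ∈ intervals1, 2 ≤ iv.length) ∧ (∀ iv ∈ intervals2, 2 ≤ iv.length)
instance (intervals1 : List (List Int)) (intervals2 : List (List Int)) : Decidable (Pre_Intersection_Intervals_length intervals1 intervals2) := by unfold Pre_Intersection_Intervals_length; infer_instance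
def pvWitness_Intersection_Intervals_length : List (List Int) × List (List Int) := ([[0, 3], [2, 6]], [[1, 4]])

def Spec_Intersection_Intervals_length (intervals1 : List (List Int)) (intervals2 : List (List Int)) (out : Int) : Prop := out = Intersection_Intervals_length_alt intervals1 intervals2
instance (intervals1 : List (List Int)) (intervals2 : List (List Int)) (out : Int) : Decidable (Spec_Intersection_Intervals_length intervals1 intervals2 out) := by unfold Spec_Intersection_Intervals_length; infer_instance

-- ===== CLAIM (what is proved, stated in full; the proofs are below) =====
def Claim_equal_Intersection_Intervals_length : Prop := ∀ (intervals1 : List (List Int)) (intervals2 : List (List Int)), Dom_Intersection_Intervals_length intervals1 intervals2 → Pre_Intersection_Intervals_length intervals1 intervals2 → Spec_Intersection_Intervals_length intervals1 intervals2 (Intersection_Intervals_length intervals1 intervals2)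

-- ===== LEMMAS AND PROOFS =====

-- length of the intersection of one pair, as A computes it
def pairLen (i j : List Int) : Int :=
  if max (pvLo i) (pvLo j) < min (pvHi i) (pvHi j)
  then min (pvHi i) (pvHi j) - max (pvLo i) (pvLo j) else 0

-- contribution of the band [a, b] collected segment by segment along the sweep list
def adjSum (a b : Int) : List Int → Int
  | x :: y :: r => (if a ≤ x ∧ y ≤ b then y - x else 0) + adjSum a b (y :: r)
  | _ => 0

-- 0/1 indicator: the interval iv covers the whole segment [x, y]
def indC (iv : List Int) (x y : Int) : Int := if pvLo iv ≤ x ∧ y ≤ pvHi iv then 1 else 0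

theorem sum_map_add {α : Type} (l : List α) (f g : α → Int) :
    (l.map (fun a => f a + g a)).sum = (l.map f).sum + (l.map g).sum := by
  induction l with
  | nil => simp
  | cons x t ih => simp [ih]; ring

theorem adjSum_eq_zero (a b : Int) :
    ∀ xs : List Int, (∀ v ∈ xs.drop 1, b < v) → adjSum a b xs = 0 := by
  intro xs
  induction xs with
  | nil => intro _; rfl
  | cons x t ih =>
    intro h
    cases t with
    | nil => rfl
    | cons y r =>
      have hy : b < y := h y (by simp)
      have h0 : adjSum a b (y :: r) = 0 := by
        apply ih; intro v hv; exact h v (by simpa using List.mem_cons_of_mem y hv)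
      simp [adjSum, h0]
      omega

theorem adjSum_congr_lo (a a' b : Int) :
    ∀ xs : List Int, (∀ u ∈ xs, a ≤ u) → (∀ u ∈ xs, a' ≤ u) →
    adjSum a b xs = adjSum a' b xs := by
  intro xs
  induction xs with
  | nil => intro _ _; rfl
  | cons x t ih =>
    intro h h'
    cases t with
    | nil => rfl
    | cons y r =>
      have hx : a ≤ x := h x (by simp)
      have hx' : a' ≤ x := h' x (by simp)
      have ht := ih (fun u hu => h u (List.mem_cons_of_mem x hu))
                   (fun u hu => h' u (List.mem_cons_of_mem x hu))
      simp [adjSum, hx, hx', ht]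

-- telescoping: on a strictly increasing list containing a and b, the sweep band sums to max 0 (b - a)
theorem tele : ∀ xs : List Int, xs.Pairwise (· < ·) → ∀ a b : Int, a ∈ xs → b ∈ xs →
    adjSum a b xs = max 0 (b - a) := by
  intro xs
  induction xs with
  | nil => intro _ a b ha; exact absurd ha (by simp)
  | cons x t ih =>
    intro hs a b ha hb
    cases t with
    | nil =>
      have hax : a = x := by simpa using ha
      have hbx : b = x := by simpa using hb
      subst hax hbx
      simp [adjSum]
    | cons y r =>
      have hxall : ∀ v ∈ y :: r, x < v := (List.pairwise_cons.mp hs).1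
      have hs' : (y :: r).Pairwise (· < ·) := (List.pairwise_cons.mp hs).2
      have hxy : x < y := hxall y (by simp)
      have hyall : ∀ v ∈ r, y < v := (List.pairwise_cons.mp hs').1
      rcases List.mem_cons.mp ha with hax | hat
      · rcases List.mem_cons.mp hb with hbx | hbt
        · -- a = x, b = x: no segment fits inside a degenerate band
          have h0 : adjSum a b (y :: r) = 0 := by
            apply adjSum_eq_zero
            intro v hv
            rw [hbx]
            exact hxall v (List.mem_cons_of_mem y (by simpa using hv))
          have hc : ¬ (a ≤ x ∧ y ≤ b) := by omega
          simp only [adjSum, if_neg hc, h0]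
          omega
        · -- a = x, b further right: first segment plus the telescoped rest
          have hyb : y ≤ b := by
            rcases List.mem_cons.mp hbt with h | h
            · omega
            · exact le_of_lt (hyall b h)
          have hc : a ≤ x ∧ y ≤ b := by omega
          have hcongr : adjSum a b (y :: r) = adjSum y b (y :: r) := by
            apply adjSum_congr_lo
            · intro u hu; rw [hax]; exact le_of_lt (hxall u hu)
            · intro u hu
              rcases List.mem_cons.mp hu with h | h
              · omega
              · exact le_of_lt (hyall u h)
          have hrec := ih hs' y b (by simp) hbt
          simp only [adjSum, if_pos hc, hcongr, hrec]
          omega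
      · -- a lies strictly right of x
        have hya : y ≤ a := by
          rcases List.mem_cons.mp hat with h | h
          · omega
          · exact le_of_lt (hyall a h)
        have hc : ¬ (a ≤ x ∧ y ≤ b) := by omega
        rcases List.mem_cons.mp hb with hbx | hbt
        · -- b = x < a: empty band
          have h0 : adjSum a b (y :: r) = 0 := by
            apply adjSum_eq_zero
            intro v hv
            rw [hbx]
            exact lt_trans hxy (hyall v (by simpa using hv))
          simp only [adjSum, if_neg hc, h0]
          omega
        · have hrec := ih hs' a b hat hbt
          simp only [adjSum, if_neg hc, hrec]
          omega

theorem count_go (ivs : List (List Int)) (x y c : Int) :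
    ivs.foldl (fun c iv => if pvLo iv ≤ x ∧ y ≤ pvHi iv then c + 1 else c) c
      = c + (ivs.map (fun iv => indC iv x y)).sum := by
  induction ivs generalizing c with
  | nil => simp
  | cons v t ih =>
    by_cases h : pvLo v ≤ x ∧ y ≤ pvHi v
    · simp [h, indC, ih]; ring
    · simp [h, indC, ih]

theorem count_eq (ivs : List (List Int)) (x y : Int) :
    pvCount ivs x y = (ivs.map (fun iv => indC iv x y)).sum := by
  unfold pvCount
  rw [count_go]
  ring

theorem step_eq (I1 I2 : List (List Int)) (x y : Int) :
    (y - x) * pvCount I1 x y * pvCount I2 x y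
      = (I1.map (fun i => (I2.map (fun j =>
          if max (pvLo i) (pvLo j) ≤ x ∧ y ≤ min (pvHi i) (pvHi j) then y - x else 0)).sum)).sum := by
  rw [count_eq, count_eq]
  have hterm : ∀ i j : List Int,
      (if max (pvLo i) (pvLo j) ≤ x ∧ y ≤ min (pvHi i) (pvHi j) then y - x else 0)
        = indC i x y * (indC j x y * (y - x)) := by
    intro i j; unfold indC; split_ifs <;> simp <;> omega
  calc (y - x) * (I1.map (fun iv => indC iv x y)).sum * (I2.map (fun iv => indC iv x y)).sum
      = (I1.map (fun i => indC i x y * ((I2.map (fun j => indC j x y * (y - x))).sum))).sum := by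
        rw [List.sum_map_mul_right, List.sum_map_mul_right]; ring
    _ = _ := by
        apply congrArg List.sum
        apply List.map_congr_left
        intro i _
        rw [← List.sum_map_mul_left]
        apply congrArg List.sum
        apply List.map_congr_left
        intro j _
        exact (hterm i j).symm

theorem sweep_eq (I1 I2 : List (List Int)) :
    ∀ xs : List Int, pvSweep I1 I2 xs
      = (I1.map (fun i => (I2.map (fun j =>
          adjSum (max (pvLo i) (pvLo j)) (min (pvHi i) (pvHi j)) xs)).sum)).sum := by
  intro xs
  induction xs with
  | nil => simp [pvSweep, adjSum]
  | cons x t ih =>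
    cases t with
    | nil => simp [pvSweep, adjSum]
    | cons y r =>
      have : pvSweep I1 I2 (x :: y :: r)
          = (y - x) * pvCount I1 x y * pvCount I2 x y + pvSweep I1 I2 (y :: r) := rfl
      rw [this, ih, step_eq]
      have hsplit : ∀ i : List Int,
          (I2.map (fun j => adjSum (max (pvLo i) (pvLo j)) (min (pvHi i) (pvHi j)) (x :: y :: r))).sum
            = (I2.map (fun j => if max (pvLo i) (pvLo j) ≤ x ∧ y ≤ min (pvHi i) (pvHi j) then y - x else 0)).sum
              + (I2.map (fun j => adjSum (max (pvLo i) (pvLo j)) (min (pvHi i) (pvHi j)) (y :: r))).sum := by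
        intro i
        rw [← sum_map_add]
        apply congrArg List.sum
        apply List.map_congr_left
        intro j _
        rfl
      calc _ = (I1.map (fun i =>
            (I2.map (fun j => if max (pvLo i) (pvLo j) ≤ x ∧ y ≤ min (pvHi i) (pvHi j) then y - x else 0)).sum
            + (I2.map (fun j => adjSum (max (pvLo i) (pvLo j)) (min (pvHi i) (pvHi j)) (y :: r))).sum)).sum := by
              rw [sum_map_add]
        _ = _ := by
              apply congrArg List.sum
              apply List.map_congr_left
              intro i _
              exact (hsplit i).symm

theorem inner_go (I2 : List (List Int)) (i : List Int) (acc : Int) :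
    I2.foldl (fun acc2 j =>
      let intersection_start := max (pvLo i) (pvLo j)
      let intersection_end := min (pvHi i) (pvHi j)
      if intersection_start < intersection_end then acc2 + (intersection_end - intersection_start)
      else acc2) acc
      = acc + (I2.map (fun j => pairLen i j)).sum := by
  induction I2 generalizing acc with
  | nil => simp
  | cons v t ih =>
    by_cases h : max (pvLo i) (pvLo v) < min (pvHi i) (pvHi v)
    · simp only [List.foldl_cons, List.map_cons, List.sum_cons, pairLen, if_pos h, ih]; ring
    · simp only [List.foldl_cons, List.map_cons, List.sum_cons, pairLen, if_neg h, ih]; ring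

theorem outer_go (I1 I2 : List (List Int)) (acc : Int) :
    I1.foldl (fun acc i =>
      I2.foldl (fun acc2 j =>
        let intersection_start := max (pvLo i) (pvLo j)
        let intersection_end := min (pvHi i) (pvHi j)
        if intersection_start < intersection_end then acc2 + (intersection_end - intersection_start)
        else acc2) acc) acc
      = acc + (I1.map (fun i => (I2.map (fun j => pairLen i j)).sum)).sum := by
  induction I1 generalizing acc with
  | nil => simp
  | cons v t ih =>
    simp only [List.foldl_cons, List.map_cons, List.sum_cons]
    rw [ih, inner_go]
    ring

theorem A_eq (I1 I2 : List (List Int)) :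
    Intersection_Intervals_length I1 I2
      = (I1.map (fun i => (I2.map (fun j => pairLen i j)).sum)).sum := by
  unfold Intersection_Intervals_length
  rw [outer_go]
  ring

theorem mem_ends : ∀ ivs : List (List Int), ∀ iv ∈ ivs, pvLo iv ∈ pvEnds ivs ∧ pvHi iv ∈ pvEnds ivs := by
  intro ivs
  induction ivs with
  | nil => intro iv h; exact absurd h (by simp)
  | cons v t ih =>
    intro iv h
    rcases List.mem_cons.mp h with h | h
    · subst h; simp [pvEnds]
    · have := ih iv h
      simp [pvEnds]
      tauto

-- ===== VERDICT (by name: the statement is the Claim_ definition above) =====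
theorem Intersection_Intervals_length_spec : Claim_equal_Intersection_Intervals_length := by
  intro I1 I2 _ _
  unfold Spec_Intersection_Intervals_length Intersection_Intervals_length_alt
  set xs := PySem.List.sorted (PySem.Set.ofList (pvEnds (I1 ++ I2))) (fun x => x) false with hxs
  have hsort : xs.Pairwise (· < ·) := PySem.List.sorted_ofList_pairwise_lt _
  have hmem : ∀ v, v ∈ pvEnds (I1 ++ I2) → v ∈ xs := by
    intro v hv
    rw [hxs, PySem.List.mem_sorted, PySem.Set.mem_ofList]
    exact hv
  rw [A_eq, sweep_eq]
  apply congrArg List.sum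
  apply List.map_congr_left
  intro i hi
  apply congrArg List.sum
  apply List.map_congr_left
  intro j hj
  have hie := mem_ends (I1 ++ I2) i (List.mem_append_left _ hi)
  have hje := mem_ends (I1 ++ I2) j (List.mem_append_right _ hj)
  have ha : max (pvLo i) (pvLo j) ∈ xs := by
    rcases max_choice (pvLo i) (pvLo j) with h | h <;> rw [h]
    · exact hmem _ hie.1
    · exact hmem _ hje.1
  have hb : min (pvHi i) (pvHi j) ∈ xs := by
    rcases min_choice (pvHi i) (pvHi j) with h | h <;> rw [h]
    · exact hmem _ hie.2
    · exact hmem _ hje.2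
  rw [tele xs hsort _ _ ha hb]
  unfold pairLen
  split_ifs <;> omega
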